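-- pv_equiv track=rewrite | github.com/aignishant/weftlyflow | src/weftlyflow/nodes/ai/text_splitter/splitter.py | _seed_with_overlap
-- ===== SOURCE A (Python) =====
-- def _seed_with_overlap(
--     prior: list[str],
--     chunk_overlap: int,
-- ) -> tuple[list[str], int]:
--     """Take the tail of ``prior`` up to ``chunk_overlap`` chars as overlap."""
--     if chunk_overlap == 0:
--         return [], 0
--     seed: list[str] = []
--     total = 0
--     for piece in reversed(prior):
--         if total + len(piece) > chunk_overlap and seed:
--             break
--         seed.insert(0, piece)
--         total += len(piece)
--         if total >= chunk_overlap: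
--             break
--     return seed, total
-- ===== SOURCE B (Python) =====
-- def _seed_with_overlap(
--     prior: list[str],
--     chunk_overlap: int,
-- ) -> tuple[list[str], int]:
--     """Take the tail of ``prior`` up to ``chunk_overlap`` chars as overlap."""
--     if chunk_overlap == 0:
--         return [], 0
--     # cum[i] = total length of the last i+1 pieces (a non-decreasing table)
--     cum = []
--     t = 0
--     for piece in reversed(prior):
--         t += len(piece)
--         cum.append(t)
--     # binary search for the first cumulative length that reaches the budget
--     lo, hi = 0, len(cum)
--     while lo < hi:
--         mid = (lo + hi) // 2
--         if cum[mid] < chunk_overlap: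
--             lo = mid + 1
--         else:
--             hi = mid
--     if lo == len(cum):
--         k = lo                  # every tail piece fits under the budget
--     elif cum[lo] == chunk_overlap:
--         k = lo + 1              # this piece exactly fills the budget: keep it
--     else:
--         k = max(lo, 1)          # this piece overflows: drop it, but keep at least one
--     return prior[len(prior) - k:], (cum[k - 1] if k else 0)
-- ===== Notes on version B (the rewrite author's own statement) =====
-- stated objective: faster
-- what changed: Replaces A's decide-and-append loop (which prepends with seed.insert(0, piece), linear per kept piece) by build-table-then-search: build the backward cumulative-length table once, binary-search it for the first entry reaching the budget to get the number k of tail pieces to keep, and return the single slice prior[len(prior)-k:] with its total read off the table.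
import Mathlib
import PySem

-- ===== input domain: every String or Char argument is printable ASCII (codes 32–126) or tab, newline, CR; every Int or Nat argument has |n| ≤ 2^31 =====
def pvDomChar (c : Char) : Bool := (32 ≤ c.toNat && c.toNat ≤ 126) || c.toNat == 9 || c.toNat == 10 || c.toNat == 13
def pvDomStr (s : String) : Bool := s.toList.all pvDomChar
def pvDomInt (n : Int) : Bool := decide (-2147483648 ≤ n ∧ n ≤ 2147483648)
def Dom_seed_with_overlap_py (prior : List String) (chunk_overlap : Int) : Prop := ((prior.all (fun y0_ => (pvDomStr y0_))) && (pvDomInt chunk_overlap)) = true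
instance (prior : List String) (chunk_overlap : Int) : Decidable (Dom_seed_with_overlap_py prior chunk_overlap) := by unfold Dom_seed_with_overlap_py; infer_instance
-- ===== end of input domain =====

-- B replaces A's decide-and-append loop (whose seed.insert(0, piece) is linear per step) by
-- build-cumulative-table-then-binary-search-then-slice; a timing run measures the speed claim.


-- ===== PORT A =====
-- A's 'for piece in reversed(prior)' loop with state (seed, total);
-- 'seed.insert(0, piece)' is cons; the two breaks are the two early returns.
def seedLoopA (ov : Int) : List String → List String → Int → List String × Int
  | [], seed, total => (seed, total)
  | p :: rest, seed, total =>
    if total + PySem.Str.len p > ov ∧ seed ≠ [] then (seed, total)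
    else if total + PySem.Str.len p ≥ ov then (p :: seed, total + PySem.Str.len p)
    else seedLoopA ov rest (p :: seed) (total + PySem.Str.len p)

def seed_with_overlap_py (prior : List String) (chunk_overlap : Int) : List String × Int :=
  if chunk_overlap = 0 then ([], 0)
  else seedLoopA chunk_overlap prior.reverse [] 0

-- ===== PORT B =====
-- Source B's cum-building loop: t accumulator, append to cum
def cumLoopB : List String → Int → List Int → List Int
  | [], _, cum => cum
  | p :: ps, t, cum => cumLoopB ps (t + PySem.Str.len p) (cum ++ [t + PySem.Str.len p])

-- Source B's 'while lo < hi' binary search; cum[mid] is in range (0 ≤ mid < hi ≤ len), so getD is exact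
def bsearchB (cum : List Int) (ov : Int) (lo hi : Nat) : Nat :=
  if lo < hi then
    let mid := (lo + hi) / 2
    if cum.getD mid 0 < ov then bsearchB cum ov (mid + 1) hi
    else bsearchB cum ov lo mid
  else lo
termination_by hi - lo
decreasing_by all_goals omega

def seed_with_overlap_py_alt (prior : List String) (chunk_overlap : Int) : List String × Int :=
  if chunk_overlap = 0 then ([], 0)
  else
    let cum := cumLoopB prior.reverse 0 []
    let lo := bsearchB cum chunk_overlap 0 cum.length
    let k := if lo = cum.length then lo
             else if cum.getD lo 0 = chunk_overlap then lo + 1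
             else max lo 1
    -- 'cum[k - 1] if k else 0': k ≤ cum.length is proved below, so getD is exact for cum[k-1]
    (prior.drop (prior.length - k), if k ≠ 0 then cum.getD (k - 1) 0 else 0)

-- ===== PRECONDITION & SPEC =====
def Spec_seed_with_overlap_py (prior : List String) (chunk_overlap : Int) (out : List String × Int) : Prop := out = seed_with_overlap_py_alt prior chunk_overlap
instance (prior : List String) (chunk_overlap : Int) (out : List String × Int) : Decidable (Spec_seed_with_overlap_py prior chunk_overlap out) := by unfold Spec_seed_with_overlap_py; infer_instance

-- ===== CLAIM (what is proved, stated in full; the proofs are below) =====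
def Claim_equal_seed_with_overlap_py : Prop := ∀ (prior : List String) (chunk_overlap : Int), Dom_seed_with_overlap_py prior chunk_overlap → Spec_seed_with_overlap_py prior chunk_overlap (seed_with_overlap_py prior chunk_overlap)

-- ===== LEMMAS AND PROOFS =====

-- structural version of the backward cumulative-length table
def cumS : List String → List Int
  | [] => []
  | p :: ps => PySem.Str.len p :: (cumS ps).map (PySem.Str.len p + ·)

-- number of pieces A's loop takes AFTER the first (forced) one, with remaining budget r
def jfun : List String → Int → Nat
  | [], _ => 0
  | p :: ps, r =>
    if PySem.Str.len p > r then 0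
    else if PySem.Str.len p ≥ r then 1
    else 1 + jfun ps (r - PySem.Str.len p)

-- pieces-and-total A's loop grabs from ps with remaining budget r (seed already nonempty)
def grab : List String → Int → List String × Int
  | [], _ => ([], 0)
  | p :: ps, r =>
    if PySem.Str.len p > r then ([], 0)
    else if PySem.Str.len p ≥ r then ([p], PySem.Str.len p)
    else ((p :: (grab ps (r - PySem.Str.len p)).1), PySem.Str.len p + (grab ps (r - PySem.Str.len p)).2)

theorem len_nonneg (s : String) : (0:Int) ≤ PySem.Str.len s := by
  simp [PySem.Str.len_eq]

theorem cumLoopB_eq (ps : List String) : ∀ (t : Int) (acc : List Int),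
    cumLoopB ps t acc = acc ++ (cumS ps).map (t + ·) := by
  induction ps with
  | nil => intro t acc; simp [-PySem.Str.len_eq, cumLoopB, cumS]
  | cons p ps ih =>
    intro t acc
    simp [-PySem.Str.len_eq, cumLoopB, cumS, ih, List.map_map, add_assoc]

theorem cumS_nonneg {ps : List String} {x : Int} (hx : x ∈ cumS ps) : 0 ≤ x := by
  induction ps generalizing x with
  | nil => simp [-PySem.Str.len_eq, cumS] at hx
  | cons p ps ih =>
    simp [-PySem.Str.len_eq, cumS] at hx
    rcases hx with h | ⟨y, hy, h⟩
    · exact h ▸ len_nonneg p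
    · have := ih hy
      have := len_nonneg p
      omega

theorem length_cumS (ps : List String) : (cumS ps).length = ps.length := by
  induction ps with
  | nil => rfl
  | cons p ps ih => simp [-PySem.Str.len_eq, cumS, ih]

theorem cumS_pairwise (ps : List String) : (cumS ps).Pairwise (· ≤ ·) := by
  induction ps with
  | nil => simp [cumS]
  | cons p ps ih =>
    rw [cumS, List.pairwise_cons]
    constructor
    · intro x hx
      simp only [List.mem_map] at hx
      obtain ⟨y, hy, hxy⟩ := hx
      have := cumS_nonneg hy
      omega
    · exact ih.map _ (fun a b h => by omega)

theorem getD_mono_of_pairwise (xs : List Int) (hp : xs.Pairwise (· ≤ ·)) (i j : Nat)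
    (hij : i ≤ j) (hj : j < xs.length) : xs.getD i 0 ≤ xs.getD j 0 := by
  rcases Nat.lt_or_ge i j with h | h
  · have hpg := (List.pairwise_iff_getElem).1 hp
    have := hpg i j (by omega) hj h
    rwa [List.getD_eq_getElem?_getD, List.getD_eq_getElem?_getD,
      List.getElem?_eq_getElem (by omega : i < xs.length),
      List.getElem?_eq_getElem hj]
  · have : i = j := by omega
    simp [this]

-- bsearchB returns the least index whose entry is ≥ ov, given loop invariants
theorem bsearchB_spec (xs : List Int) (hp : xs.Pairwise (· ≤ ·)) (ov : Int) : ∀ (fuel lo hi : Nat), hi - lo ≤ fuel →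
    lo ≤ hi → hi ≤ xs.length →
    (∀ i, i < lo → xs.getD i 0 < ov) →
    (∀ i, hi ≤ i → i < xs.length → ¬ xs.getD i 0 < ov) →
    (∀ i, i < bsearchB xs ov lo hi → xs.getD i 0 < ov) ∧
    (∀ i, bsearchB xs ov lo hi ≤ i → i < xs.length → ¬ xs.getD i 0 < ov) ∧
    bsearchB xs ov lo hi ≤ hi := by
  intro fuel
  induction fuel with
  | zero =>
    intro lo hi hf hlh hhn h1 h2
    have : lo = hi := by omega
    rw [bsearchB, if_neg (by omega)]
    exact ⟨fun i hi' => h1 i (by omega), fun i hi' hn => h2 i (by omega) hn, by omega⟩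
  | succ f ih =>
    intro lo hi hf hlh hhn h1 h2
    rw [bsearchB]
    by_cases hlt : lo < hi
    · rw [if_pos hlt]
      simp only
      by_cases hmid : xs.getD ((lo + hi) / 2) 0 < ov
      · rw [if_pos hmid]
        refine ih ((lo + hi) / 2 + 1) hi (by omega) (by omega) hhn ?_ h2
        intro i hi'
        rcases Nat.lt_or_ge i lo with h | h
        · exact h1 i h
        · calc xs.getD i 0 ≤ xs.getD ((lo + hi) / 2) 0 :=
                getD_mono_of_pairwise xs hp i ((lo + hi) / 2) (by omega) (by omega)
            _ < ov := hmid
      · rw [if_neg hmid]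
        refine ih lo ((lo + hi) / 2) (by omega) (by omega) (by omega) h1 ?_ |>.imp id
          (fun h => h.imp id (by omega))
        intro i hi' hn hcon
        have : xs.getD ((lo + hi) / 2) 0 ≤ xs.getD i 0 :=
          getD_mono_of_pairwise xs hp ((lo + hi) / 2) i (by omega) hn
        omega
    · rw [if_neg hlt]
      exact ⟨fun i hi' => h1 i (by omega), fun i hi' hn => h2 i (by omega) hn, by omega⟩

-- countP equals m when the predicate holds exactly on the first m positions
theorem countP_eq_of_cut (p : Int → Bool) : ∀ (xs : List Int) (m : Nat), m ≤ xs.length →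
    (∀ i, i < m → p (xs.getD i 0) = true) →
    (∀ i, m ≤ i → i < xs.length → p (xs.getD i 0) = false) →
    xs.countP p = m := by
  intro xs
  induction xs with
  | nil => intro m hm _ _; simp at hm; simp [hm]
  | cons x xs ih =>
    intro m hm h1 h2
    cases m with
    | zero =>
      have hx : p x = false := by have := h2 0 (by omega) (by simp); simpa using this
      have hrec := ih 0 (by omega) (fun i hi => by omega)
        (fun i _ hi => by have := h2 (i+1) (by omega) (by simpa using Nat.succ_lt_succ hi); simpa using this)
      rw [List.countP_cons, hx]
      simp [hrec]
    | succ m' =>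
      have hx : p x = true := by have := h1 0 (by omega); simpa using this
      rw [List.countP_cons, hx, if_pos rfl]
      rw [ih m' (by simpa using hm)
        (fun i hi => by have := h1 (i+1) (by omega); simpa using this)
        (fun i hi hn => by have := h2 (i+1) (by omega) (by simpa using Nat.succ_lt_succ hn); simpa using this)]

-- countP is at least m when the predicate holds on the first m positions
theorem countP_ge_of_prefix (p : Int → Bool) : ∀ (xs : List Int) (m : Nat), m ≤ xs.length →
    (∀ i, i < m → p (xs.getD i 0) = true) →
    m ≤ xs.countP p := by
  intro xs
  induction xs with
  | nil => intro m hm _; simp at hm; omega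
  | cons x xs ih =>
    intro m hm h1
    cases m with
    | zero => omega
    | succ m' =>
      have hx : p x = true := by have := h1 0 (by omega); simpa using this
      rw [List.countP_cons, hx, if_pos rfl]
      have := ih m' (by simpa using hm) (fun i hi => by have := h1 (i+1) (by omega); simpa using this)
      omega

theorem jfun_eq_counts (ps : List String) : ∀ r : Int,
    jfun ps r = min ((cumS ps).countP (fun c => decide (c < r)) + 1)
                    ((cumS ps).countP (fun c => decide (c ≤ r))) := by
  induction ps with
  | nil => intro r; simp [-PySem.Str.len_eq, jfun, cumS]
  | cons p ps ih =>
    intro r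
    set l := PySem.Str.len p with hl
    have hmaplt : ∀ q : Int, ((cumS ps).map (l + ·)).countP (fun c => decide (c < q)) =
        (cumS ps).countP (fun c => decide (c < q - l)) := by
      intro q
      rw [List.countP_map]
      apply List.countP_congr
      intro x _; simp [Function.comp]; omega
    have hmaple : ∀ q : Int, ((cumS ps).map (l + ·)).countP (fun c => decide (c ≤ q)) =
        (cumS ps).countP (fun c => decide (c ≤ q - l)) := by
      intro q
      rw [List.countP_map]
      apply List.countP_congr
      intro x _; simp [Function.comp]; omega
    by_cases h1 : l > r
    · -- every entry of cumS (p::ps) exceeds r: both counts are 0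
      have hlt : ((cumS (p :: ps)).countP (fun c => decide (c < r))) = 0 := by
        rw [List.countP_eq_zero]
        intro x hx
        have hge : r < x := by
          simp only [cumS, List.mem_cons, List.mem_map] at hx
          rcases hx with h | ⟨y, hy, h⟩
          · omega
          · have := cumS_nonneg hy; omega
        simp only [decide_eq_true_eq]; omega
      have hle : ((cumS (p :: ps)).countP (fun c => decide (c ≤ r))) = 0 := by
        rw [List.countP_eq_zero]
        intro x hx
        have hge : r < x := by
          simp only [cumS, List.mem_cons, List.mem_map] at hx
          rcases hx with h | ⟨y, hy, h⟩
          · omega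
          · have := cumS_nonneg hy; omega
        simp only [decide_eq_true_eq]; omega
      simp [-PySem.Str.len_eq, jfun, ← hl, h1, hlt, hle]
    · by_cases h2 : l ≥ r
      · -- l = r : head counts for ≤ but not <, tail counts for < are 0
        have hr : l = r := by omega
        have hlt : ((cumS (p :: ps)).countP (fun c => decide (c < r))) = 0 := by
          rw [List.countP_eq_zero]
          intro x hx
          have : r ≤ x := by
            simp only [cumS, List.mem_cons, List.mem_map] at hx
            rcases hx with h | ⟨y, hy, h⟩
            · omega
            · have := cumS_nonneg hy; omega
          simp only [decide_eq_true_eq]; omega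
        have hle : 1 ≤ ((cumS (p :: ps)).countP (fun c => decide (c ≤ r))) := by
          rw [cumS, List.countP_cons,
            if_pos (show decide (PySem.Str.len p ≤ r) = true by simp only [decide_eq_true_eq]; omega)]
          omega
        rw [jfun, if_neg h1, if_pos h2, hlt]
        omega
      · -- l < r : head counts for both; recurse with budget r - l
        have hlt : ((cumS (p :: ps)).countP (fun c => decide (c < r))) =
            (cumS ps).countP (fun c => decide (c < r - l)) + 1 := by
          simp [-PySem.Str.len_eq, cumS, ← hl, List.countP_cons, hmaplt r]
          omega
        have hle : ((cumS (p :: ps)).countP (fun c => decide (c ≤ r))) =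
            (cumS ps).countP (fun c => decide (c ≤ r - l)) + 1 := by
          simp [-PySem.Str.len_eq, cumS, ← hl, List.countP_cons, hmaple r]
          omega
        rw [jfun]
        simp only [← hl, if_neg h1, if_neg h2, hlt, hle, ih (r - l)]
        omega

theorem jfun_le (ps : List String) (r : Int) : jfun ps r ≤ ps.length := by
  have h := jfun_eq_counts ps r
  have h2 : ((cumS ps).countP (fun c => decide (c ≤ r))) ≤ ps.length := by
    calc ((cumS ps).countP (fun c => decide (c ≤ r))) ≤ (cumS ps).length := List.countP_le_length
    _ = ps.length := length_cumS ps
  omega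

theorem grab_fst (ps : List String) : ∀ r : Int, (grab ps r).1 = ps.take (jfun ps r) := by
  induction ps with
  | nil => intro r; simp [-PySem.Str.len_eq, grab, jfun]
  | cons p ps ih =>
    intro r
    by_cases h1 : PySem.Str.len p > r
    · simp [-PySem.Str.len_eq, grab, jfun, h1]
    · by_cases h2 : PySem.Str.len p ≥ r
      · simp [-PySem.Str.len_eq, grab, jfun, h1, h2]
      · simp [-PySem.Str.len_eq, grab, jfun, h1, h2, ih, Nat.add_comm 1]

theorem grab_snd_zero (ps : List String) (r : Int) (h : jfun ps r = 0) : (grab ps r).2 = 0 := by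
  cases ps with
  | nil => simp [-PySem.Str.len_eq, grab]
  | cons p ps =>
    by_cases h1 : PySem.Str.len p > r
    · simp [-PySem.Str.len_eq, grab, h1]
    · by_cases h2 : PySem.Str.len p ≥ r
      · simp [-PySem.Str.len_eq, jfun, h1, h2] at h
      · simp [-PySem.Str.len_eq, jfun, h1, h2] at h

theorem grab_snd_cum (ps : List String) : ∀ r : Int, 1 ≤ jfun ps r →
    (cumS ps).getD (jfun ps r - 1) 0 = (grab ps r).2 := by
  induction ps with
  | nil => intro r h; simp [-PySem.Str.len_eq, jfun] at h
  | cons p ps ih =>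
    intro r h
    by_cases h1 : PySem.Str.len p > r
    · simp [-PySem.Str.len_eq, jfun, h1] at h
    · by_cases h2 : PySem.Str.len p ≥ r
      · simp [-PySem.Str.len_eq, jfun, h1, h2, grab, cumS]
      · rw [jfun] at h ⊢
        simp only [if_neg h1, if_neg h2] at h ⊢
        rw [grab]
        simp only [if_neg h1, if_neg h2]
        rcases Nat.eq_zero_or_pos (jfun ps (r - PySem.Str.len p)) with hz | hpos
        · rw [hz]
          simp [-PySem.Str.len_eq, cumS, grab_snd_zero ps _ hz]
        · have hb : jfun ps (r - PySem.Str.len p) - 1 < (cumS ps).length := by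
            have := jfun_le ps (r - PySem.Str.len p)
            rw [length_cumS]; omega
          have hstep : (cumS (p :: ps)).getD (1 + jfun ps (r - PySem.Str.len p) - 1) 0 =
              PySem.Str.len p + (cumS ps).getD (jfun ps (r - PySem.Str.len p) - 1) 0 := by
            obtain ⟨m, hm⟩ : ∃ m, jfun ps (r - PySem.Str.len p) = m + 1 :=
              ⟨_, (Nat.succ_pred_eq_of_pos hpos).symm⟩
            rw [hm]
            simp only [cumS, Nat.add_sub_cancel, Nat.add_sub_cancel_left]
            rw [List.getD_cons_succ]
            rw [List.getD_eq_getElem?_getD, List.getElem?_map]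
            rw [List.getElem?_eq_getElem (by rw [hm] at hb; simpa using hb)]
            simp [List.getD_eq_getElem?_getD, List.getElem?_eq_getElem (by rw [hm] at hb; simpa using hb)]
          rw [hstep, ih _ hpos]

theorem seedLoopA_grab (ov : Int) (ps : List String) : ∀ (seed : List String) (total : Int),
    seed ≠ [] → seedLoopA ov ps seed total =
      ((grab ps (ov - total)).1.reverse ++ seed, total + (grab ps (ov - total)).2) := by
  induction ps with
  | nil => intro seed total _; simp [seedLoopA, grab]
  | cons p ps ih =>
    intro seed total hs
    rw [seedLoopA, grab]
    by_cases h1 : total + PySem.Str.len p > ov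
    · rw [if_pos ⟨h1, hs⟩, if_pos (show PySem.Str.len p > ov - total by omega)]
      simp
    · rw [if_neg (by tauto), if_neg (show ¬ PySem.Str.len p > ov - total by omega)]
      by_cases h2 : total + PySem.Str.len p ≥ ov
      · rw [if_pos h2, if_pos (show PySem.Str.len p ≥ ov - total by omega)]
        simp
      · rw [if_neg h2, if_neg (show ¬ PySem.Str.len p ≥ ov - total by omega)]
        rw [ih (p :: seed) (total + PySem.Str.len p) (by simp)]
        rw [show ov - (total + PySem.Str.len p) = ov - total - PySem.Str.len p by ring]
        simp [List.reverse_cons, List.append_assoc, add_assoc]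

-- number of tail pieces A keeps when prior is nonempty: 1 forced, then jfun on the rest
def kkA (p : String) (ps : List String) (ov : Int) : Nat :=
  if PySem.Str.len p ≥ ov then 1 else 1 + jfun ps (ov - PySem.Str.len p)

theorem A_char (p : String) (ps : List String) (ov : Int) :
    seedLoopA ov (p :: ps) [] 0 =
      (((p :: ps).take (kkA p ps ov)).reverse, (cumS (p :: ps)).getD (kkA p ps ov - 1) 0) := by
  rw [seedLoopA]
  by_cases h2 : PySem.Str.len p ≥ ov
  · rw [if_neg (by simp), if_pos (show (0:Int) + PySem.Str.len p ≥ ov by omega)]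
    simp [-PySem.Str.len_eq, kkA, h2, cumS]
  · have hc : ¬ ((0:Int) + PySem.Str.len p ≥ ov) := by omega
    rw [if_neg (by simp), if_neg hc]
    rw [seedLoopA_grab ov ps [p] (0 + PySem.Str.len p) (by simp)]
    rw [grab_fst]
    have hkk : kkA p ps ov = 1 + jfun ps (ov - PySem.Str.len p) := by simp [-PySem.Str.len_eq, kkA, h2]
    rcases Nat.eq_zero_or_pos (jfun ps (ov - (0 + PySem.Str.len p))) with hz | hpos
    · simp only [zero_add] at hz ⊢
      rw [grab_snd_zero ps _ hz]
      simp [-PySem.Str.len_eq, hkk, hz, cumS]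
    · simp only [zero_add] at hpos ⊢
      rw [← grab_snd_cum ps _ hpos]
      have hb : jfun ps (ov - PySem.Str.len p) - 1 < (cumS ps).length := by
        have := jfun_le ps (ov - PySem.Str.len p)
        rw [length_cumS]; omega
      obtain ⟨m, hm⟩ : ∃ m, jfun ps (ov - PySem.Str.len p) = m + 1 :=
        ⟨_, (Nat.succ_pred_eq_of_pos hpos).symm⟩
      refine Prod.ext ?_ ?_
      · have hcomm : 1 + jfun ps (ov - PySem.Str.len p) = jfun ps (ov - PySem.Str.len p) + 1 :=
          Nat.add_comm _ _
        rw [hkk, hcomm, List.take_succ_cons, List.reverse_cons]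
      · have hb' : m < (cumS ps).length := by rw [hm] at hb; omega
        simp only [hkk, hm, cumS, Nat.add_sub_cancel_left, Nat.add_sub_cancel]
        rw [List.getD_cons_succ]
        simp [List.getD_eq_getElem?_getD, List.getElem?_map, List.getElem?_eq_getElem hb']

theorem B_char (prior : List String) (p : String) (ps : List String) (ov : Int)
    (hov : ov ≠ 0) (hrev : prior.reverse = p :: ps) :
    seed_with_overlap_py_alt prior ov =
      (((p :: ps).take (kkA p ps ov)).reverse, (cumS (p :: ps)).getD (kkA p ps ov - 1) 0) := by
  have hne : prior ≠ [] := by intro h; rw [h] at hrev; simp at hrev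
  have hlen : prior.length = ps.length + 1 := by rw [← List.length_reverse, hrev]; simp
  have hcum : cumLoopB prior.reverse 0 [] = cumS (p :: ps) := by
    rw [hrev, cumLoopB_eq]; simp
  have hclen : (cumS (p :: ps)).length = ps.length + 1 := by
    rw [length_cumS]; simp
  have hpw : (cumS (p :: ps)).Pairwise (· ≤ ·) := cumS_pairwise _
  obtain ⟨hA, hB, hC⟩ := bsearchB_spec (cumS (p :: ps)) hpw ov (cumS (p :: ps)).length 0
    (cumS (p :: ps)).length (by omega) (by omega) (le_refl _)
    (fun i hi => absurd hi (by omega)) (fun i h1 h2 => absurd h2 (by omega))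
  -- the value computed by B's binary search
  have hLc : (cumS (p :: ps)).countP (fun x => decide (x < ov)) =
      bsearchB (cumS (p :: ps)) ov 0 (cumS (p :: ps)).length := by
    refine countP_eq_of_cut _ _ _ hC (fun i hi => by simpa using hA i hi)
      (fun i h1 h2 => by simpa using hB i h1 h2)
  set L := bsearchB (cumS (p :: ps)) ov 0 (cumS (p :: ps)).length with hLdef
  set H := (cumS (p :: ps)).countP (fun x => decide (x ≤ ov)) with hHdef
  set K := (if L = (cumS (p :: ps)).length then L
            else if (cumS (p :: ps)).getD L 0 = ov then L + 1
            else max L 1) with hKdef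
  have hunf : seed_with_overlap_py_alt prior ov =
      (prior.drop (prior.length - K),
        if K ≠ 0 then (cumS (p :: ps)).getD (K - 1) 0 else 0) := by
    rw [seed_with_overlap_py_alt, if_neg hov, hcum]
  -- K equals the count-based formula
  have hKmm : K = max 1 (min (L + 1) H) := by
    rw [hKdef]
    by_cases h1 : L = (cumS (p :: ps)).length
    · have hHfull : H = (cumS (p :: ps)).length := by
        rw [hHdef]
        refine countP_eq_of_cut _ _ _ (le_refl _)
          (fun i hi => by have := hA i (h1 ▸ hi); simp only [decide_eq_true_eq]; omega)
          (fun i hge hlt => by omega)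
      rw [if_pos h1, hHfull]
      omega
    · rw [if_neg h1]
      have hLlt : L < (cumS (p :: ps)).length := by omega
      by_cases h2 : (cumS (p :: ps)).getD L 0 = ov
      · have hHge : L + 1 ≤ H := by
          rw [hHdef]
          refine countP_ge_of_prefix _ _ _ (by omega) ?_
          intro i hi
          rcases Nat.lt_or_ge i L with h | h
          · have := hA i h; simp only [decide_eq_true_eq]; omega
          · have : i = L := by omega
            rw [this, h2]; simp
        rw [if_pos h2]
        omega
      · have hgt : ov < (cumS (p :: ps)).getD L 0 := by
          have := hB L (le_refl _) hLlt
          omega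
        have hHeq : H = L := by
          rw [hHdef]
          refine countP_eq_of_cut _ _ _ (by omega)
            (fun i hi => by have := hA i hi; simp only [decide_eq_true_eq]; omega) ?_
          intro i hge hlt
          have := getD_mono_of_pairwise _ hpw L i hge hlt
          simp only [decide_eq_false_iff_not]; omega
        rw [if_neg h2, hHeq]
        omega
  have hk : max 1 (min ((cumS (p :: ps)).countP (fun c => decide (c < ov)) + 1)
      ((cumS (p :: ps)).countP (fun c => decide (c ≤ ov)))) = kkA p ps ov := by
    rw [← jfun_eq_counts (p :: ps) ov, jfun, kkA]
    by_cases hx1 : PySem.Str.len p > ov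
    · rw [if_pos hx1, if_pos (show PySem.Str.len p ≥ ov by omega)]
      rfl
    · rw [if_neg hx1]
      by_cases hx2 : PySem.Str.len p ≥ ov
      · rw [if_pos hx2]
        rfl
      · rw [if_neg hx2]
        omega
  have hKkk : K = kkA p ps ov := by
    rw [hKmm, ← hk, hLc]
  have hkk1 : 1 ≤ kkA p ps ov := by
    rw [kkA]; split <;> omega
  have hkle : kkA p ps ov ≤ prior.length := by
    have := jfun_le ps (ov - PySem.Str.len p)
    rw [kkA]; split <;> omega
  have hdrop : prior.drop (prior.length - kkA p ps ov) =
      ((p :: ps).take (kkA p ps ov)).reverse := by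
    have h1 : (prior.drop (prior.length - kkA p ps ov)).reverse =
        prior.reverse.take (prior.length - (prior.length - kkA p ps ov)) := List.reverse_drop
    have h2 : prior.length - (prior.length - kkA p ps ov) = kkA p ps ov := by omega
    rw [h2, hrev] at h1
    rw [← List.reverse_reverse (prior.drop (prior.length - kkA p ps ov)), h1]
  rw [hunf, hKkk, hdrop, if_pos (by omega)]

-- ===== VERDICT (by name: the statement is the Claim_ definition above) =====
theorem seed_with_overlap_py_spec : Claim_equal_seed_with_overlap_py := by
  intro prior ov _
  unfold Spec_seed_with_overlap_py seed_with_overlap_py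
  by_cases hov : ov = 0
  · simp [hov, seed_with_overlap_py_alt]
  · rw [if_neg hov]
    cases hrev : prior.reverse with
    | nil =>
      have hpe : prior = [] := by
        have := congrArg List.reverse hrev; simpa using this
      subst hpe
      simp [seedLoopA, seed_with_overlap_py_alt, hov, cumLoopB, bsearchB]
    | cons p ps =>
      rw [A_char, B_char prior p ps ov hov hrev]
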